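-- pv_equiv track=rewrite | github.com/marselinemars/FypExperimentation | scripts/verify_run.py | summarize_attempts
-- ===== SOURCE A (Python) =====
-- from collections import Counter
--
-- def summarize_attempts(records):
--     total = Counter()
--     valid = Counter()
--     invalid = Counter()
--     for record in records:
--         operator = record.get("operator") or "unknown"
--         total[operator] += 1
--         if record.get("status") == "valid":
--             valid[operator] += 1
--         else:
--             invalid[operator] += 1
--     return {
--         "total": dict(sorted(total.items())),
--         "valid": dict(sorted(valid.items())),
--         "invalid": dict(sorted(invalid.items())),
--     }
-- ===== SOURCE B (Python) =====
-- def summarize_attempts(records):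
--     # sort-then-scan: sort (operator, is_valid) pairs by operator once, then sweep the
--     # sorted list collapsing each run of equal operators into its counts
--     keyed = sorted(((record.get("operator") or "unknown",
--                      record.get("status") == "valid") for record in records),
--                    key=lambda pair: pair[0])
--     total, valid, invalid = {}, {}, {}
--     i, n = 0, len(keyed)
--     while i < n:
--         op = keyed[i][0]
--         j, v = i, 0
--         while j < n and keyed[j][0] == op:
--             v += keyed[j][1]
--             j += 1
--         t = j - i
--         total[op] = t
--         if v:
--             valid[op] = v
--         if t > v:
--             invalid[op] = t - v
--         i = j
--     return {"total": total, "valid": valid, "invalid": invalid}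
-- ===== Notes on version B (the rewrite author's own statement) =====
-- stated objective: alternative
-- what changed: Replaces A's three hash Counters with sort-then-scan: build a list of (operator, is_valid) pairs, sort it once by operator, then sweep the sorted list collapsing each run of equal operators into its total/valid/invalid counts (no dict accumulation at all).
import Mathlib
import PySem

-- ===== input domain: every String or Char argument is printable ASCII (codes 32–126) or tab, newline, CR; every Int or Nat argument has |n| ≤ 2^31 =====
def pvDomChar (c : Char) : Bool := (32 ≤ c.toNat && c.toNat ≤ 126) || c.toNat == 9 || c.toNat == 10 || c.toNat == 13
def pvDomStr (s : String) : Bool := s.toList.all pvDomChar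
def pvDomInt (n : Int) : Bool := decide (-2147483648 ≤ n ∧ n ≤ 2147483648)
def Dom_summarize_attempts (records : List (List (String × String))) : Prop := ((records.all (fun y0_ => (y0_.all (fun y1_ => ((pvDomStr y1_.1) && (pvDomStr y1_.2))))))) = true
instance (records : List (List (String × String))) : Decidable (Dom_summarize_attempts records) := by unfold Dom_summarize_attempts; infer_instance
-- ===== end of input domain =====

-- B replaces A's three hash Counters with sort-then-scan: it sorts the (operator, is_valid)
-- pairs once by operator and then sweeps the sorted list, collapsing each run of equal
-- operators into its counts.

-- shared helpers (the identical Python expressions `record.get("operator") or "unknown"`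
-- and `record.get("status") == "valid"` occur in both programs)
def pyOp (record : List (String × String)) : String :=
  match (PySem.Dict.mk record).get? "operator" with
  | none => "unknown"
  | some s => if s = "" then "unknown" else s

def statusValid (record : List (String × String)) : Bool :=
  (PySem.Dict.mk record).get? "status" == some "valid"

-- ===== PORT A =====
def summarize_attempts (records : List (List (String × String))) : List (String × List (String × Int)) :=
  let s := records.foldl
    (fun (acc : PySem.Dict String Int × PySem.Dict String Int × PySem.Dict String Int) record =>
      let operator := pyOp record
      let total := acc.1.modify operator 0 (· + 1)
      if statusValid record then
        (total, acc.2.1.modify operator 0 (· + 1), acc.2.2)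
      else
        (total, acc.2.1, acc.2.2.modify operator 0 (· + 1)))
    (PySem.Dict.empty, PySem.Dict.empty, PySem.Dict.empty)
  [("total", PySem.List.sorted2 s.1.items (fun p => p.1) (fun p => p.2) false),
   ("valid", PySem.List.sorted2 s.2.1.items (fun p => p.1) (fun p => p.2) false),
   ("invalid", PySem.List.sorted2 s.2.2.items (fun p => p.1) (fun p => p.2) false)]

-- ===== PORT B =====
-- the outer while loop of Source B: each step consumes the run of the current operator
-- (the inner `while j < n and keyed[j][0] == op` loop = takeWhile/dropWhile on the rest)
def bGroup : List (String × Bool) → List (String × Int) × List (String × Int) × List (String × Int)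
  | [] => ([], [], [])
  | p :: rest =>
    let op := p.1
    let run := rest.takeWhile (fun q => q.1 == op)
    let t : Int := (run.length : Int) + 1
    let v : Int := (if p.2 then 1 else 0) + (run.countP (fun q => q.2) : Int)
    let g := bGroup (rest.dropWhile (fun q => q.1 == op))
    ((op, t) :: g.1,
     if v ≠ 0 then (op, v) :: g.2.1 else g.2.1,
     if t > v then (op, t - v) :: g.2.2 else g.2.2)
  termination_by l => l.length
  decreasing_by
    simp only [List.length_cons]
    exact Nat.lt_succ_of_le (rest.dropWhile_sublist _).length_le

def summarize_attempts_alt (records : List (List (String × String))) : List (String × List (String × Int)) :=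
  let keyed := PySem.List.sorted
    (records.map (fun record => (pyOp record, statusValid record))) (fun pair => pair.1) false
  let g := bGroup keyed
  [("total", g.1), ("valid", g.2.1), ("invalid", g.2.2)]

-- ===== PRECONDITION & SPEC =====
def Spec_summarize_attempts (records : List (List (String × String))) (out : List (String × List (String × Int))) : Prop := out = summarize_attempts_alt records
instance (records : List (List (String × String))) (out : List (String × List (String × Int))) : Decidable (Spec_summarize_attempts records out) := by unfold Spec_summarize_attempts; infer_instance

-- ===== CLAIM (what is proved, stated in full; the proofs are below) =====
def Claim_equal_summarize_attempts : Prop := ∀ (records : List (List (String × String))), Dom_summarize_attempts records → Spec_summarize_attempts records (summarize_attempts records)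

-- ===== LEMMAS AND PROOFS =====

-- insertion with agreeing comparators
lemma insertBy_congr_fn {α : Type} (f g : α → α → Bool) (x : α) (acc : List α)
    (h : ∀ y ∈ acc, f x y = g x y) :
    PySem.List.insertBy f x acc = PySem.List.insertBy g x acc := by
  induction acc with
  | nil => rfl
  | cons y ys ih =>
    simp only [PySem.List.insertBy]
    rw [h y (by simp)]
    cases hg : g x y with
    | true => simp
    | false =>
      simp only [Bool.false_eq_true, if_false, List.cons.injEq, true_and]
      exact ih (fun z hz => h z (by simp [hz]))

lemma foldl_insertBy_congr {α : Type} (f g : α → α → Bool) (S : List α)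
    (hfg : ∀ a ∈ S, ∀ b ∈ S, f a b = g a b) :
    ∀ (xs acc : List α), (∀ a ∈ xs, a ∈ S) → (∀ a ∈ acc, a ∈ S) →
    xs.foldl (fun acc x => PySem.List.insertBy f x acc) acc
      = xs.foldl (fun acc x => PySem.List.insertBy g x acc) acc := by
  intro xs
  induction xs with
  | nil => intro acc _ _; rfl
  | cons x xs ih =>
    intro acc hxs hacc
    simp only [List.foldl_cons]
    rw [insertBy_congr_fn f g x acc
      (fun y hy => hfg x (hxs x (by simp)) y (hacc y hy))]
    exact ih (PySem.List.insertBy g x acc) (fun a ha => hxs a (by simp [ha]))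
      (fun a ha => by
        rcases (PySem.List.mem_insertBy _ _ _ _).mp ha with h | h
        · exact h ▸ hxs x (by simp)
        · exact hacc a h)

-- Python's tuple sort of an items list with pairwise-distinct keys is sort by key
lemma sorted2_eq_sorted_fst (xs : List (String × Int))
    (h : ∀ a ∈ xs, ∀ b ∈ xs, a.1 = b.1 → a = b) :
    PySem.List.sorted2 xs (fun p => p.1) (fun p => p.2) false
      = PySem.List.sorted xs (fun p => p.1) false := by
  rw [PySem.List.sorted_eq_foldl_insertBy]
  show xs.foldl (fun acc x => PySem.List.insertBy
      (fun a b => decide (a.1 < b.1) || (!decide (b.1 < a.1) && decide (a.2 < b.2))) x acc) []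
    = xs.foldl (fun acc x => PySem.List.insertBy (fun a b => decide (a.1 < b.1)) x acc) []
  apply foldl_insertBy_congr _ _ xs ?_ xs [] (fun a ha => ha) (by simp)
  intro a ha b hb
  by_cases hab : a.1 = b.1
  · cases h a ha b hb hab
    simp
  · rcases lt_trichotomy a.1 b.1 with hlt | heq | hgt
    · simp [hlt, asymm hlt]
    · exact absurd heq hab
    · have hnl : ¬ a.1 < b.1 := asymm hgt
      simp [hnl, hgt]

lemma counter_map_foldl (l : List (List (String × String))) :
    l.foldl (fun d r => d.modify (pyOp r) 0 (· + 1)) PySem.Dict.empty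
      = PySem.Dict.counter (l.map pyOp) := by
  rw [PySem.Dict.counter_eq_foldl, List.foldl_map]

-- Python sorted(Counter(xs).items())
lemma sorted2_items_counter (xs : List String) :
    PySem.List.sorted2 (PySem.Dict.counter xs).items (fun p => p.1) (fun p => p.2) false
      = (PySem.List.sorted (PySem.Set.ofList xs) (fun k => k) false).map
          (fun k => (k, (xs.count k : Int))) := by
  rw [sorted2_eq_sorted_fst]
  · apply PySem.List.sorted_eq_of_perm_of_pairwise_lt
    · rw [PySem.Dict.items_counter]
      exact (PySem.List.sorted_perm _ _ _).map _
    · rw [List.pairwise_map]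
      exact PySem.List.sorted_ofList_pairwise_lt xs
  · intro a ha b hb hab
    rw [PySem.Dict.items_counter] at ha hb
    rcases List.mem_map.mp ha with ⟨k1, hk1, rfl⟩
    rcases List.mem_map.mp hb with ⟨k2, hk2, rfl⟩
    simp only at hab
    subst hab
    rfl

-- A's loop splits into three independent counting folds
lemma A_fold_proj (records : List (List (String × String))) :
    ∀ (t v i : PySem.Dict String Int),
    records.foldl
      (fun (acc : PySem.Dict String Int × PySem.Dict String Int × PySem.Dict String Int) record =>
        let operator := pyOp record
        let total := acc.1.modify operator 0 (· + 1)
        if statusValid record then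
          (total, acc.2.1.modify operator 0 (· + 1), acc.2.2)
        else
          (total, acc.2.1, acc.2.2.modify operator 0 (· + 1))) (t, v, i)
    = (records.foldl (fun d r => d.modify (pyOp r) 0 (· + 1)) t,
       (records.filter statusValid).foldl (fun d r => d.modify (pyOp r) 0 (· + 1)) v,
       (records.filter (fun r => !statusValid r)).foldl (fun d r => d.modify (pyOp r) 0 (· + 1)) i) := by
  induction records with
  | nil => intro t v i; rfl
  | cons r rs ih =>
    intro t v i
    simp only [List.foldl_cons, List.filter_cons]
    by_cases h : statusValid r
    · simp only [h, if_true, Bool.not_true, Bool.false_eq_true, if_false, List.foldl_cons]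
      exact ih _ _ _
    · simp only [h, Bool.false_eq_true, if_false, Bool.not_false, if_true, List.foldl_cons]
      exact ih _ _ _

lemma count_part (records : List (List (String × String))) (k : String) :
    (records.map pyOp).count k
      = ((records.filter statusValid).map pyOp).count k
        + ((records.filter (fun r => !statusValid r)).map pyOp).count k := by
  induction records with
  | nil => rfl
  | cons r rs ih =>
    simp only [List.map_cons, List.filter_cons]
    by_cases h : statusValid r <;>
      simp [h, List.count_cons, ih] <;> omega

lemma count_part_int (records : List (List (String × String))) (k : String) :
    ((records.map pyOp).count k : Int)
      - (((records.filter statusValid).map pyOp).count k : Int)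
      = (((records.filter (fun r => !statusValid r)).map pyOp).count k : Int) := by
  have := count_part records k
  omega

lemma mem_filtered_map {p : List (String × String) → Bool}
    (records : List (List (String × String))) (k : String)
    (h : k ∈ (records.filter p).map pyOp) : k ∈ records.map pyOp := by
  rcases List.mem_map.mp h with ⟨r, hr, rfl⟩
  exact List.mem_map.mpr ⟨r, (List.mem_filter.mp hr).1, rfl⟩

-- sorted distinct keys of a sublist = filter of the sorted distinct keys of the whole list
lemma sorted_ofList_filter (xs ys : List String) (hsub : ∀ k ∈ ys, k ∈ xs) :
    PySem.List.sorted (PySem.Set.ofList ys) (fun k => k) false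
      = (PySem.List.sorted (PySem.Set.ofList xs) (fun k => k) false).filter
          (fun k => decide (ys.count k ≠ 0)) := by
  apply PySem.List.sorted_eq_of_perm_of_pairwise_lt
  · have hnds : (PySem.List.sorted (PySem.Set.ofList xs) (fun k => k) false).Nodup :=
      (PySem.List.sorted_perm _ _ _).symm.nodup (PySem.Set.nodup_ofList xs)
    rw [List.perm_ext_iff_of_nodup (hnds.filter _) (PySem.Set.nodup_ofList ys)]
    intro k
    simp only [List.mem_filter, PySem.List.mem_sorted, PySem.Set.mem_ofList,
      decide_eq_true_eq, ne_eq]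
    constructor
    · rintro ⟨-, hc⟩
      rw [← List.count_pos_iff]
      omega
    · intro hky
      exact ⟨hsub k hky, by simpa using (List.count_pos_iff.mpr hky).ne'⟩
  · exact (PySem.List.sorted_ofList_pairwise_lt xs).filter _

-- closed form of port A
lemma A_eval (records : List (List (String × String))) :
    summarize_attempts records =
    [("total", (PySem.List.sorted (PySem.Set.ofList (records.map pyOp)) (fun k => k) false).map
        (fun k => (k, ((records.map pyOp).count k : Int)))),
     ("valid", (PySem.List.sorted (PySem.Set.ofList ((records.filter statusValid).map pyOp)) (fun k => k) false).map
        (fun k => (k, (((records.filter statusValid).map pyOp).count k : Int)))),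
     ("invalid", (PySem.List.sorted (PySem.Set.ofList ((records.filter (fun r => !statusValid r)).map pyOp)) (fun k => k) false).map
        (fun k => (k, (((records.filter (fun r => !statusValid r)).map pyOp).count k : Int))))] := by
  simp only [summarize_attempts]
  rw [A_fold_proj]
  simp only [counter_map_foldl, sorted2_items_counter]

-- ---- B side: run-collapsing over a key-sorted list ----

-- first-occurrence keys of the runs (helper for the proofs only)
def firstKeys : List (String × Bool) → List String
  | [] => []
  | p :: rest => p.1 :: firstKeys (rest.dropWhile (fun q => q.1 == p.1))
  termination_by l => l.length
  decreasing_by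
    simp only [List.length_cons]
    exact Nat.lt_succ_of_le (rest.dropWhile_sublist _).length_le

-- on a key-sorted list, everything after the head's run has a strictly larger key
lemma dropWhile_key_gt (k : String) :
    ∀ (rest : List (String × Bool)), rest.Pairwise (fun a b => a.1 ≤ b.1) →
    (∀ q ∈ rest, k ≤ q.1) →
    ∀ q ∈ rest.dropWhile (fun q => q.1 == k), k < q.1 := by
  intro rest
  induction rest with
  | nil => simp
  | cons h t ih =>
    intro hp hle q hq
    by_cases hh : h.1 = k
    · rw [List.dropWhile_cons_of_pos (by simp [hh])] at hq
      exact ih hp.tail (fun q hq' => hle q (List.mem_cons_of_mem _ hq')) q hq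
    · rw [List.dropWhile_cons_of_neg (by simp [hh])] at hq
      have hkh : k < h.1 := lt_of_le_of_ne (hle h (by simp)) (Ne.symm hh)
      rcases List.mem_cons.mp hq with rfl | hq
      · exact hkh
      · exact lt_of_lt_of_le hkh (List.rel_of_pairwise_cons hp hq)

lemma mem_firstKeys_mem (l : List (String × Bool)) :
    ∀ x ∈ firstKeys l, x ∈ l.map Prod.fst := by
  induction l using firstKeys.induct with
  | case1 => simp [firstKeys]
  | case2 p rest ih =>
    intro x hx
    rw [firstKeys] at hx
    rcases List.mem_cons.mp hx with rfl | hx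
    · simp
    · have := ih x hx
      rcases List.mem_map.mp this with ⟨q, hq, rfl⟩
      exact List.mem_map.mpr ⟨q, List.mem_cons_of_mem _ ((rest.dropWhile_sublist _).mem hq), rfl⟩

lemma mem_map_firstKeys (l : List (String × Bool)) :
    l.Pairwise (fun a b => a.1 ≤ b.1) → ∀ x ∈ l.map Prod.fst, x ∈ firstKeys l := by
  induction l using firstKeys.induct with
  | case1 => simp
  | case2 p rest ih =>
    intro hs x hx
    rw [firstKeys]
    by_cases hxp : x = p.1
    · simp [hxp]
    · rcases List.mem_map.mp hx with ⟨q, hq, rfl⟩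
      rcases List.mem_cons.mp hq with rfl | hq
      · exact absurd rfl hxp
      · right
        have hsplit : q ∈ rest.takeWhile (fun q => q.1 == p.1) ++ rest.dropWhile (fun q => q.1 == p.1) := by
          rw [List.takeWhile_append_dropWhile]; exact hq
        rcases List.mem_append.mp hsplit with hrun | htail
        · exact absurd (by simpa using List.mem_takeWhile_imp hrun) hxp
        · exact ih (hs.tail.sublist (rest.dropWhile_sublist _)) q.1
            (List.mem_map.mpr ⟨q, htail, rfl⟩)

lemma firstKeys_pairwise_lt (l : List (String × Bool)) :
    l.Pairwise (fun a b => a.1 ≤ b.1) → (firstKeys l).Pairwise (· < ·) := by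
  induction l using firstKeys.induct with
  | case1 => intro _; rw [firstKeys]; exact List.Pairwise.nil
  | case2 p rest ih =>
    intro hs
    rw [firstKeys]
    refine List.Pairwise.cons ?_ (ih (hs.tail.sublist (rest.dropWhile_sublist _)))
    intro x hx
    rcases List.mem_map.mp (mem_firstKeys_mem _ x hx) with ⟨q, hq, rfl⟩
    exact dropWhile_key_gt p.1 rest hs.tail (fun q hq' => List.rel_of_pairwise_cons hs hq') q hq

-- count helpers for the sweep proof
def cT (l : List (String × Bool)) (k : String) : Int := ((l.map Prod.fst).count k : Int)
def cV (l : List (String × Bool)) (k : String) : Int :=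
  (((l.filter (fun q => q.2)).map Prod.fst).count k : Int)

lemma count_run_nat (run : List (String × Bool)) (k : String) (h : ∀ q ∈ run, q.1 = k) :
    (run.map Prod.fst).count k = run.length := by
  induction run with
  | nil => rfl
  | cons q qs ih =>
    simp only [List.map_cons, List.count_cons, List.length_cons,
      ih (fun x hx => h x (List.mem_cons_of_mem _ hx))]
    simp [h q (by simp)]

lemma count_zero_of_ne (tail : List (String × Bool)) (k : String) (h : ∀ q ∈ tail, q.1 ≠ k) :
    (tail.map Prod.fst).count k = 0 := by
  rw [List.count_eq_zero]
  intro hm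
  rcases List.mem_map.mp hm with ⟨q, hq, hqk⟩
  exact h q hq hqk

lemma cT_cons (p : String × Bool) (run tail : List (String × Bool))
    (hrunk : ∀ q ∈ run, q.1 = p.1) (htailk : ∀ q ∈ tail, p.1 < q.1) :
    cT (p :: (run ++ tail)) p.1 = (run.length : Int) + 1 := by
  simp only [cT, List.map_cons, List.map_append, List.count_cons, List.count_append,
    count_run_nat run p.1 hrunk,
    count_zero_of_ne tail p.1 (fun q hq => (ne_of_gt (htailk q hq)))]
  simp

lemma cV_cons (p : String × Bool) (run tail : List (String × Bool))
    (hrunk : ∀ q ∈ run, q.1 = p.1) (htailk : ∀ q ∈ tail, p.1 < q.1) :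
    cV (p :: (run ++ tail)) p.1 = (if p.2 then 1 else 0) + (run.countP (fun q => q.2) : Int) := by
  simp only [cV, List.filter_cons, List.filter_append]
  have hrunf : (((run.filter (fun q => q.2)).map Prod.fst).count p.1)
      = (run.filter (fun q => q.2)).length :=
    count_run_nat _ _ (fun q hq => hrunk q (List.mem_filter.mp hq).1)
  have htailf : (((tail.filter (fun q => q.2)).map Prod.fst).count p.1) = 0 :=
    count_zero_of_ne _ _ (fun q hq => ne_of_gt (htailk q (List.mem_filter.mp hq).1))
  by_cases hp : p.2
  · simp only [hp, if_true, List.map_cons, List.count_cons, List.countP_eq_length_filter]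
    simp [List.count_append, hrunf, htailf]
    omega
  · simp [hp, List.count_append, hrunf, htailf, List.countP_eq_length_filter]

lemma cT_shift (p : String × Bool) (run tail : List (String × Bool))
    (hrunk : ∀ q ∈ run, q.1 = p.1) (k' : String) (hne : k' ≠ p.1) :
    cT (p :: (run ++ tail)) k' = cT tail k' := by
  simp only [cT, List.map_cons, List.map_append, List.count_cons, List.count_append,
    count_zero_of_ne run k' (fun q hq => by rw [hrunk q hq]; exact fun e => hne e.symm)]
  simp [Ne.symm hne]

lemma cV_shift (p : String × Bool) (run tail : List (String × Bool))
    (hrunk : ∀ q ∈ run, q.1 = p.1) (k' : String) (hne : k' ≠ p.1) :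
    cV (p :: (run ++ tail)) k' = cV tail k' := by
  simp only [cV, List.filter_cons, List.filter_append]
  have hrunf : (((run.filter (fun q => q.2)).map Prod.fst).count k') = 0 :=
    count_zero_of_ne _ _ (fun q hq => by
      rw [hrunk q (List.mem_filter.mp hq).1]; exact fun e => hne e.symm)
  by_cases hp : p.2
  · simp [hp, List.count_append, hrunf, Ne.symm hne]
  · simp [hp, List.count_append, hrunf]

lemma cV_le_cT (l : List (String × Bool)) (k : String) : cV l k ≤ cT l k := by
  simp only [cV, cT]
  have hsub : ((l.filter (fun q => q.2)).map Prod.fst).Sublist (l.map Prod.fst) :=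
    (List.filter_sublist).map _
  have := hsub.count_le k
  omega

-- closed form of the run-collapsing sweep on a key-sorted list
lemma bGroup_eval (l : List (String × Bool)) :
    l.Pairwise (fun a b => a.1 ≤ b.1) →
    bGroup l =
      ((firstKeys l).map (fun k => (k, cT l k)),
       ((firstKeys l).filter (fun k => decide (cV l k ≠ 0))).map (fun k => (k, cV l k)),
       ((firstKeys l).filter (fun k => decide (cT l k - cV l k ≠ 0))).map
         (fun k => (k, cT l k - cV l k))) := by
  induction l using firstKeys.induct with
  | case1 => intro _; rw [bGroup, firstKeys]; rfl
  | case2 p rest ih =>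
    intro hs
    have hrunk : ∀ q ∈ rest.takeWhile (fun q => q.1 == p.1), q.1 = p.1 :=
      fun q hq => by simpa using List.mem_takeWhile_imp hq
    have htailk : ∀ q ∈ rest.dropWhile (fun q => q.1 == p.1), p.1 < q.1 :=
      dropWhile_key_gt p.1 rest hs.tail (fun q hq => List.rel_of_pairwise_cons hs hq)
    have htails : (rest.dropWhile (fun q => q.1 == p.1)).Pairwise (fun a b => a.1 ≤ b.1) :=
      hs.tail.sublist (rest.dropWhile_sublist _)
    have hmem : ∀ k' ∈ firstKeys (rest.dropWhile (fun q => q.1 == p.1)), k' ≠ p.1 := by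
      intro k' hk'
      rcases List.mem_map.mp (mem_firstKeys_mem _ k' hk') with ⟨q, hq, rfl⟩
      exact ne_of_gt (htailk q hq)
    have hrest : rest = rest.takeWhile (fun q => q.1 == p.1) ++ rest.dropWhile (fun q => q.1 == p.1) :=
      (rest.takeWhile_append_dropWhile (p := fun q => q.1 == p.1)).symm
    have htk : cT (p :: rest) p.1 = ((rest.takeWhile (fun q => q.1 == p.1)).length : Int) + 1 := by
      conv_lhs => rw [hrest]
      exact cT_cons p _ _ hrunk htailk
    have hvk : cV (p :: rest) p.1
        = (if p.2 then 1 else 0) + ((rest.takeWhile (fun q => q.1 == p.1)).countP (fun q => q.2) : Int) := by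
      conv_lhs => rw [hrest]
      exact cV_cons p _ _ hrunk htailk
    have hT : ∀ k', k' ≠ p.1 → cT (p :: rest) k' = cT (rest.dropWhile (fun q => q.1 == p.1)) k' := by
      intro k' hne
      conv_lhs => rw [hrest]
      exact cT_shift p _ _ hrunk k' hne
    have hV : ∀ k', k' ≠ p.1 → cV (p :: rest) k' = cV (rest.dropWhile (fun q => q.1 == p.1)) k' := by
      intro k' hne
      conv_lhs => rw [hrest]
      exact cV_shift p _ _ hrunk k' hne
    rw [bGroup, firstKeys, ih htails]
    simp only [Prod.mk.injEq]
    refine ⟨?_, ?_, ?_⟩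
    · rw [List.map_cons]
      refine congrArg₂ _ (by rw [htk]) ?_
      exact (List.map_congr_left (fun k' hk' => by rw [hT k' (hmem k' hk')])).symm
    · rw [List.filter_cons,
        List.filter_congr (fun k' hk' => by rw [hV k' (hmem k' hk')] :
          ∀ k' ∈ firstKeys (rest.dropWhile (fun q => q.1 == p.1)),
            decide (cV (rest.dropWhile (fun q => q.1 == p.1)) k' ≠ 0) = decide (cV (p :: rest) k' ≠ 0)),
        ← hvk]
      by_cases hv : cV (p :: rest) p.1 ≠ 0
      · rw [if_pos hv, if_pos (by simpa using hv), List.map_cons]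
        refine congrArg₂ _ rfl ?_
        exact (List.map_congr_left (fun k' hk'' => by
          rw [hV k' (hmem k' (List.mem_filter.mp hk'').1)])).symm
      · rw [if_neg hv, if_neg (by simpa using hv)]
        exact (List.map_congr_left (fun k' hk'' => by
          rw [hV k' (hmem k' (List.mem_filter.mp hk'').1)])).symm
    · rw [List.filter_cons,
        List.filter_congr (fun k' hk' => by rw [hT k' (hmem k' hk'), hV k' (hmem k' hk')] :
          ∀ k' ∈ firstKeys (rest.dropWhile (fun q => q.1 == p.1)),
            decide (cT (rest.dropWhile (fun q => q.1 == p.1)) k'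
                - cV (rest.dropWhile (fun q => q.1 == p.1)) k' ≠ 0)
              = decide (cT (p :: rest) k' - cV (p :: rest) k' ≠ 0)),
        ← htk, ← hvk]
      have hcond : (cT (p :: rest) p.1 > cV (p :: rest) p.1)
          ↔ cT (p :: rest) p.1 - cV (p :: rest) p.1 ≠ 0 := by
        have := cV_le_cT (p :: rest) p.1
        omega
      by_cases hc : cT (p :: rest) p.1 - cV (p :: rest) p.1 ≠ 0
      · rw [if_pos (hcond.mpr hc), if_pos (by simpa using hc), List.map_cons]
        refine congrArg₂ _ rfl ?_
        exact (List.map_congr_left (fun k' hk'' => by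
          rw [hT k' (hmem k' (List.mem_filter.mp hk'').1),
              hV k' (hmem k' (List.mem_filter.mp hk'').1)])).symm
      · rw [if_neg (fun h => hc (hcond.mp h)), if_neg (by simpa using hc)]
        exact (List.map_congr_left (fun k' hk'' => by
          rw [hT k' (hmem k' (List.mem_filter.mp hk'').1),
              hV k' (hmem k' (List.mem_filter.mp hk'').1)])).symm

-- closed form of port B (same right-hand side as A_eval after the filter bridge)
lemma alt_eval (records : List (List (String × String))) :
    summarize_attempts_alt records =
    [("total", (PySem.List.sorted (PySem.Set.ofList (records.map pyOp)) (fun k => k) false).map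
        (fun k => (k, ((records.map pyOp).count k : Int)))),
     ("valid", ((PySem.List.sorted (PySem.Set.ofList (records.map pyOp)) (fun k => k) false).filter
          (fun k => decide ((((records.filter statusValid).map pyOp).count k : Int) ≠ 0))).map
        (fun k => (k, (((records.filter statusValid).map pyOp).count k : Int)))),
     ("invalid", ((PySem.List.sorted (PySem.Set.ofList (records.map pyOp)) (fun k => k) false).filter
          (fun k => decide (((records.map pyOp).count k : Int)
              - (((records.filter statusValid).map pyOp).count k : Int) ≠ 0))).map
        (fun k => (k, ((records.map pyOp).count k : Int)
              - (((records.filter statusValid).map pyOp).count k : Int))))] := by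
  have hs : (PySem.List.sorted (records.map (fun record => (pyOp record, statusValid record)))
      (fun pair => pair.1) false).Pairwise (fun a b => a.1 ≤ b.1) :=
    PySem.List.sorted_pairwise _ _
  have hperm := PySem.List.sorted_perm
    (records.map (fun record => (pyOp record, statusValid record))) (fun pair => pair.1) false
  have hmapfst : (records.map (fun record => (pyOp record, statusValid record))).map Prod.fst
      = records.map pyOp := by
    rw [List.map_map]; rfl
  have hfilter : ((records.map (fun record => (pyOp record, statusValid record))).filter
        (fun q => q.2)).map Prod.fst
      = (records.filter statusValid).map pyOp := by
    rw [List.filter_map, List.map_map]; rfl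
  have hT' : ∀ k, cT (PySem.List.sorted (records.map (fun record => (pyOp record, statusValid record)))
      (fun pair => pair.1) false) k = ((records.map pyOp).count k : Int) := by
    intro k
    simp only [cT]
    rw [(hperm.map Prod.fst).count_eq, hmapfst]
  have hV' : ∀ k, cV (PySem.List.sorted (records.map (fun record => (pyOp record, statusValid record)))
      (fun pair => pair.1) false) k = (((records.filter statusValid).map pyOp).count k : Int) := by
    intro k
    simp only [cV]
    rw [((hperm.filter _).map Prod.fst).count_eq, hfilter]
  have hfk : firstKeys (PySem.List.sorted (records.map (fun record => (pyOp record, statusValid record)))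
        (fun pair => pair.1) false)
      = PySem.List.sorted (PySem.Set.ofList (records.map pyOp)) (fun k => k) false := by
    refine Eq.symm (PySem.List.sorted_eq_of_perm_of_pairwise_lt _ _ _ ?_ ?_)
    · rw [List.perm_ext_iff_of_nodup
        ((firstKeys_pairwise_lt _ hs).imp ne_of_lt) (PySem.Set.nodup_ofList _)]
      intro x
      constructor
      · intro hx
        rw [PySem.Set.mem_ofList, ← hmapfst]
        exact (hperm.map Prod.fst).mem_iff.mp (mem_firstKeys_mem _ x hx)
      · intro hx
        refine mem_map_firstKeys _ hs x ?_
        refine (hperm.map Prod.fst).mem_iff.mpr ?_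
        rw [hmapfst]
        exact (PySem.Set.mem_ofList _ _).mp hx
    · exact firstKeys_pairwise_lt _ hs
  simp only [summarize_attempts_alt]
  rw [bGroup_eval _ hs, hfk]
  simp only [hT', hV']

-- ===== VERDICT =====
theorem summarize_attempts_spec : Claim_equal_summarize_attempts := by
  intro records _
  show summarize_attempts records = summarize_attempts_alt records
  rw [A_eval, alt_eval]
  refine congrArg₂ _ rfl (congrArg₂ _ ?_ (congrArg₂ _ ?_ rfl))
  · refine congrArg _ (congrArg _ ?_)
    rw [show (fun k => decide ((((records.filter statusValid).map pyOp).count k : Int) ≠ 0))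
        = (fun k => decide (((records.filter statusValid).map pyOp).count k ≠ 0)) from by
      funext k; simp]
    rw [← sorted_ofList_filter (records.map pyOp) ((records.filter statusValid).map pyOp)
      (mem_filtered_map records)]
  · simp only [count_part_int]
    refine congrArg _ (congrArg _ ?_)
    rw [show (fun k => decide ((((records.filter (fun r => !statusValid r)).map pyOp).count k : Int) ≠ 0))
        = (fun k => decide (((records.filter (fun r => !statusValid r)).map pyOp).count k ≠ 0)) from by
      funext k; simp]
    rw [← sorted_ofList_filter (records.map pyOp)
      ((records.filter (fun r => !statusValid r)).map pyOp) (mem_filtered_map records)]
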